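-- pv_equiv track=rewrite | github.com/cadets/cadets-ui | query/print_graph_json.py | sort_unique
-- ===== SOURCE A (Python) =====
-- def sort_unique(file_list):
--     fmap = {} # File name to lowest ID
--
--     for fn in file_list:
--         fname, fid = fn
--         if fname not in fmap:
--             fmap[fname] = fid
--         else:
--             if fid < fmap[fname]:
--                 fmap[fname] = fid
--     return fmap
-- ===== SOURCE B (Python) =====
-- def sort_unique(file_list):
--     groups = {}  # file name -> list of all its IDs, in encounter order
--     for fname, fid in file_list:
--         groups.setdefault(fname, []).append(fid)
--     return {name: min(ids) for name, ids in groups.items()}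
-- ===== Notes on version B (the rewrite author's own statement) =====
-- stated objective: alternative
-- what changed: B separates collection from reduction: one pass groups every filename's IDs into lists, a second pass takes min of each group, instead of A's inline running-minimum dict.
import Mathlib
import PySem

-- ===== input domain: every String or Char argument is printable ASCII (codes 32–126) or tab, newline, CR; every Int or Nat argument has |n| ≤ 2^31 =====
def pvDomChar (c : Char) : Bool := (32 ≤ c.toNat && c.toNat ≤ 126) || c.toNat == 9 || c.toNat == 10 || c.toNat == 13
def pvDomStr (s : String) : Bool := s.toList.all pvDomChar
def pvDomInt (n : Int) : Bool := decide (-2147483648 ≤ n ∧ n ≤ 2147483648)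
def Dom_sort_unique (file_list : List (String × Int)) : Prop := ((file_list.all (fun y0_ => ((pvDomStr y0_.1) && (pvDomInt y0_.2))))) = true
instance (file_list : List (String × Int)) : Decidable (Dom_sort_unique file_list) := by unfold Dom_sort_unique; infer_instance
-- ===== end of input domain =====

-- B groups each filename's IDs into a list in one pass, then maps min over the groups,
-- instead of A's inline running-minimum; an alternative decomposition, not claimed faster.

-- ===== PORT A =====
-- literal transliteration of A: a dict loop keeping the running minimum per filename
def sort_unique (file_list : List (String × Int)) : List (String × Int) :=
  (file_list.foldl (fun fmap fn =>
      match fmap.get? fn.1 with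
      | none => fmap.insert fn.1 fn.2
      | some cur => if fn.2 < cur then fmap.insert fn.1 fn.2 else fmap)
    PySem.Dict.empty).items

-- ===== PORT B =====
-- groups.setdefault(fname, []).append(fid) mutates the stored list: its composite effect
-- is exactly Dict.modify fname [] (· ++ [fid]).  min(ids) is ported as
-- (PySem.List.min? ids id).getD 0; every group is nonempty so the default is never used.
def sort_unique_alt (file_list : List (String × Int)) : List (String × Int) :=
  ((file_list.foldl (fun groups fn => groups.modify fn.1 [] (· ++ [fn.2]))
      PySem.Dict.empty).items).map
    (fun p => (p.1, (PySem.List.min? p.2 (fun y => y)).getD 0))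

-- ===== PRECONDITION & SPEC =====
def Spec_sort_unique (file_list : List (String × Int)) (out : List (String × Int)) : Prop := out = sort_unique_alt file_list
instance (file_list : List (String × Int)) (out : List (String × Int)) : Decidable (Spec_sort_unique file_list out) := by unfold Spec_sort_unique; infer_instance

-- ===== CLAIM (what is proved, stated in full; the proofs are below) =====
def Claim_equal_sort_unique : Prop := ∀ (file_list : List (String × Int)), Dom_sort_unique file_list → Spec_sort_unique file_list (sort_unique file_list)

-- ===== LEMMAS AND PROOFS =====

-- A's loop body, named for the proofs
def stepA (d : PySem.Dict String Int) (fn : String × Int) : PySem.Dict String Int :=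
  match d.get? fn.1 with
  | none => d.insert fn.1 fn.2
  | some cur => if fn.2 < cur then d.insert fn.1 fn.2 else d

-- running minimum over a list of IDs, starting from an optional current minimum
def runmin (o : Option Int) (ids : List Int) : Option Int :=
  ids.foldl (fun o v => some (match o with | none => v | some m => min m v)) o

theorem stepA_get? (d : PySem.Dict String Int) (k' : String) (v' : Int) (k : String) :
    (stepA d (k', v')).get? k =
      if k' = k then some (match d.get? k' with | none => v' | some m => min m v')
      else d.get? k := by
  unfold stepA
  rcases h : d.get? k' with _ | m
  · rw [PySem.Dict.get?_insert]
    by_cases hk : k' = k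
    · subst hk; simp
    · rw [if_neg (Ne.symm hk), if_neg hk]
  · by_cases hv : v' < m
    · have hmin : min m v' = v' := by omega
      simp only [if_pos hv]
      rw [PySem.Dict.get?_insert]
      by_cases hk : k' = k
      · subst hk; simp [hmin]
      · rw [if_neg (Ne.symm hk), if_neg hk]
    · have hmin : min m v' = m := by omega
      simp only [if_neg hv]
      by_cases hk : k' = k
      · subst hk; simp [hmin, h]
      · rw [if_neg hk]

theorem foldl_stepA_get? (l : List (String × Int)) (d : PySem.Dict String Int) (k : String) :
    (l.foldl stepA d).get? k =
      runmin (d.get? k) ((l.filter (fun p => p.1 == k)).map (·.2)) := by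
  induction l generalizing d with
  | nil => rfl
  | cons p t ih =>
    obtain ⟨k', v'⟩ := p
    simp only [List.foldl_cons, ih, stepA_get?, List.filter_cons]
    by_cases hk : k' = k
    · subst hk; simp [runmin]
    · simp [hk, runmin]

theorem stepA_keys (d : PySem.Dict String Int) (p : String × Int) :
    (stepA d p).keys = PySem.Set.add d.keys p.1 := by
  unfold stepA
  rcases h : d.get? p.1 with _ | m
  · have hc : d.contains p.1 = false := by
      rcases h' : d.contains p.1
      · rfl
      · rw [PySem.Dict.contains_eq_isSome_get?, h] at h'; simp at h'
    rw [PySem.Dict.keys_insert_of_not_contains _ _ hc,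
        PySem.Set.add_of_not_mem]
    rw [← PySem.Dict.contains_iff_mem_keys]
    simp [hc]
  · have hc : d.contains p.1 = true := by
      rw [PySem.Dict.contains_eq_isSome_get?, h]; rfl
    have hm : p.1 ∈ d.keys := (PySem.Dict.contains_iff_mem_keys d p.1).mp hc
    by_cases hv : p.2 < m
    · simp [hv, PySem.Dict.keys_insert_of_contains _ _ hc, PySem.Set.add_of_mem hm]
    · simp [hv, PySem.Set.add_of_mem hm]


theorem foldl_stepA_keys (l : List (String × Int)) (d : PySem.Dict String Int) :
    (l.foldl stepA d).keys = PySem.Set.update d.keys (l.map (·.1)) := by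
  induction l generalizing d with
  | nil => rfl
  | cons p t ih =>
    simp only [List.foldl_cons, List.map_cons, PySem.Set.update_cons, ih, stepA_keys]

theorem runmin_some (t : List Int) (m : Int) : runmin (some m) t = some (t.foldl min m) := by
  induction t generalizing m with
  | nil => rfl
  | cons x xs ih =>
    show runmin (some (min m x)) xs = some ((x :: xs).foldl min m)
    rw [ih, List.foldl_cons]

theorem runmin_none_eq_min? (ids : List Int) :
    runmin none ids = PySem.List.min? ids (fun y => y) := by
  cases ids with
  | nil => rfl
  | cons x t =>
    rw [PySem.List.min?_id_cons]
    show runmin (some x) t = _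
    rw [runmin_some]

-- ===== VERDICT (by name: the statement is the Claim_ definition above) =====
theorem sort_unique_spec : Claim_equal_sort_unique := by
  intro l _
  unfold Spec_sort_unique sort_unique sort_unique_alt
  change (List.foldl stepA PySem.Dict.empty l).items = _
  set dA := l.foldl stepA PySem.Dict.empty with hdA
  set dG := l.foldl (fun groups fn => groups.modify fn.1 [] (· ++ [fn.2])) PySem.Dict.empty with hdG
  have hkA : dA.keys = PySem.Set.ofList (l.map (·.1)) := by
    rw [hdA, foldl_stepA_keys]
    simp [PySem.Dict.keys_empty, PySem.Set.update_nil_left]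
  have hkG : dG.keys = PySem.Set.ofList (l.map (·.1)) := by
    rw [hdG, PySem.Dict.keys_foldl_modify_key]
    simp [PySem.Dict.keys_empty, PySem.Set.update_nil_left]
  have hndA : dA.keys.Nodup := by rw [hkA]; exact PySem.Set.nodup_ofList _
  have hndG : dG.keys.Nodup := by rw [hkG]; exact PySem.Set.nodup_ofList _
  have hA : dA.items = dA.keys.map (fun k => (k, dA.getD k 0)) :=
    PySem.Dict.items_eq_map_keys dA hndA 0
  have hG : dG.items = dG.keys.map (fun k => (k, dG.getD k [])) :=
    PySem.Dict.items_eq_map_keys dG hndG []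
  rw [hA, hG, List.map_map, hkA, hkG]
  apply List.map_congr_left
  intro k _
  have hGk : dG.getD k [] = (l.filter (fun p => p.1 == k)).map (·.2) := by
    rw [hdG]
    have := PySem.Dict.getD_foldl_modify_append (l := l) (d := PySem.Dict.empty) (c := k)
    simpa [PySem.Dict.getD_empty] using this
  have hAk : dA.getD k 0 =
      (PySem.List.min? ((l.filter (fun p => p.1 == k)).map (·.2)) (fun y => y)).getD 0 := by
    rw [PySem.Dict.getD_eq_get?_getD, hdA,
        foldl_stepA_get? l PySem.Dict.empty k, PySem.Dict.get?_empty,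
        runmin_none_eq_min?]
  simp [Function.comp, hGk, hAk]
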